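-- pv_equiv track=rewrite | github.com/Arsen1302/Code-copy-detector | TestData/solutions/problem_1627_4.py | solution_1627_4
-- ===== SOURCE A (Python) =====
-- from typing import List
--
-- def solution_1627_4(nums: List[int]) -> int:
--
--
--     num = set(nums)
--
--     a = list(num)
--
--     a.sort()
--
--     ans = 0
--
--     for i in range(len(a)):
--         if a[i] != 0:
--             ans += 1
--
--             for j in range(i + 1, len(a)):
--                 a[j] -= a[i]
--
--     return ans
-- ===== SOURCE B (Python) =====
-- from typing import List
--
-- def solution_1627_4(nums: List[int]) -> int:
--     return len({x for x in nums if x != 0})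
-- ===== Notes on version B (the rewrite author's own statement) =====
-- stated objective: simpler
-- what changed: B drops A's sort and nested repeated-subtraction simulation and directly counts the distinct nonzero values in one pass.
-- intended difference: On inputs containing 0 together with a negative value, A's leftover subtractions turn the 0 entry nonzero and A returns the full distinct count (e.g. 2 on [-1, 0]), while B returns the distinct nonzero count (1), which is the intended answer since the value 0 needs no operation. — e.g. on solution_1627_4([-1, 0]): A returns 2, B returns 1
import Mathlib
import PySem

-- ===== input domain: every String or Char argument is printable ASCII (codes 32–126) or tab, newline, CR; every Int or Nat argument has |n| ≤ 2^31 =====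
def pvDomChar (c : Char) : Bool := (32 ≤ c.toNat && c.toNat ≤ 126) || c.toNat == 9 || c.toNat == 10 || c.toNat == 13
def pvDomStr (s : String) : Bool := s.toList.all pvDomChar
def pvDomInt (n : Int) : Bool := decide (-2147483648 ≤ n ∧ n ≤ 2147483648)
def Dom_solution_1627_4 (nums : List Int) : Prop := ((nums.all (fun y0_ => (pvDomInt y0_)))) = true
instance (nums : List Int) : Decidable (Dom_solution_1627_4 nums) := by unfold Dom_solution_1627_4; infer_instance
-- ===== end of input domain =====

-- B replaces A's sort plus nested repeated-subtraction loops with a one-pass count of the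
-- distinct nonzero values (simpler); on inputs holding 0 together with a negative value,
-- B returns the intended distinct-nonzero count where A also counts the 0 (see D_ below).

-- ===== PORT A =====
-- inner loop: 'for j in range(i + 1, len(a)): a[j] -= a[i]'
def pvInnerA (i : Int) (b : List Int) : List Int :=
  (PySem.List.pyRange (i + 1) (b.length : Int) 1).foldl
    (fun c j => PySem.List.pySetD c j (PySem.List.pyGetD c j 0 - PySem.List.pyGetD c i 0)) b

-- outer loop body: 'if a[i] != 0: ans += 1; <inner loop>'
def pvStepA (st : List Int × Int) (i : Int) : List Int × Int :=
  if PySem.List.pyGetD st.1 i 0 ≠ 0 then (pvInnerA i st.1, st.2 + 1) else st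


def solution_1627_4 (nums : List Int) : Int :=
  let num : PySem.Set Int := PySem.Set.ofList nums
  let a : List Int := PySem.List.sorted num (fun x => x) false
  ((PySem.List.pyRange 0 (a.length : Int) 1).foldl pvStepA (a, 0)).2

-- ===== PORT B =====
def solution_1627_4_alt (nums : List Int) : Int :=
  ((PySem.Set.ofList (nums.filter (fun x => x != 0))).length : Int)

-- ===== PRECONDITION & SPEC =====
-- On inputs containing 0 together with a negative value, A's leftover subtractions turn the
-- 0 entry nonzero and A returns the full distinct count (2 on [-1, 0]); B returns the distinct
-- nonzero count (1), the intended answer since the value 0 needs no operation.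
def D_solution_1627_4 (nums : List Int) : Prop :=
  (0 : Int) ∈ nums ∧ ∃ x ∈ nums, x < 0
instance (nums : List Int) : Decidable (D_solution_1627_4 nums) := by
  unfold D_solution_1627_4; infer_instance

def Spec_solution_1627_4 (nums : List Int) (out : Int) : Prop :=
  ¬ D_solution_1627_4 nums → out = solution_1627_4_alt nums
instance (nums : List Int) (out : Int) : Decidable (Spec_solution_1627_4 nums out) := by
  unfold Spec_solution_1627_4; infer_instance

def pvDiffWitness_solution_1627_4 : List Int := [-1, 0]
def pvDiffWitnessOut_solution_1627_4 : Int × Int := (2, 1)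

-- ===== CLAIM (what is proved, stated in full; the proofs are below) =====
def Claim_unchanged_solution_1627_4 : Prop :=
  ∀ (nums : List Int), Dom_solution_1627_4 nums → Spec_solution_1627_4 nums (solution_1627_4 nums)
def Claim_changed_solution_1627_4 : Prop :=
  Dom_solution_1627_4 (pvDiffWitness_solution_1627_4) ∧ D_solution_1627_4 (pvDiffWitness_solution_1627_4) ∧ solution_1627_4 (pvDiffWitness_solution_1627_4) = pvDiffWitnessOut_solution_1627_4.1 ∧ solution_1627_4_alt (pvDiffWitness_solution_1627_4) = pvDiffWitnessOut_solution_1627_4.2 ∧ pvDiffWitnessOut_solution_1627_4.1 ≠ pvDiffWitnessOut_solution_1627_4.2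
def Claim_exact_solution_1627_4 : Prop :=
  ∀ (nums : List Int), Dom_solution_1627_4 nums → D_solution_1627_4 nums → solution_1627_4 nums ≠ solution_1627_4_alt nums

-- ===== LEMMAS AND PROOFS =====

theorem pvInner_fold (L i : Nat) :
    ∀ (d n : Nat) (c : List Int), L - n = d → c.length = L → i < n →
    (PySem.List.pyRange (n : Int) (L : Int) 1).foldl
      (fun c j => PySem.List.pySetD c j (PySem.List.pyGetD c j 0 - PySem.List.pyGetD c (i : Int) 0)) c
    = c.take n ++ (c.drop n).map (fun v => v - c.getD i 0) := by
  intro d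
  induction d with
  | zero =>
    intro n c hd hc hi
    have hLn : L ≤ n := by omega
    rw [PySem.List.pyRange_one_eq_nil (by exact_mod_cast hLn)]
    simp [List.drop_eq_nil_of_le (by omega : c.length ≤ n), List.take_of_length_le (by omega : c.length ≤ n)]
  | succ d ih =>
    intro n c hd hc hi
    have hn : n < L := by omega
    have hnc : n < c.length := by omega
    rw [PySem.List.pyRange_one_cons (by exact_mod_cast hn), List.foldl_cons]
    set v : Int := c.getD n 0 - c.getD i 0 with hv
    have hacc : PySem.List.pySetD c (n : Int) (PySem.List.pyGetD c (n : Int) 0 - PySem.List.pyGetD c (i : Int) 0) = c.set n v := by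
      simp [hv]
    have hcast : ((n : Int) + 1) = ((n + 1 : Nat) : Int) := by push_cast; ring
    rw [hacc, hcast, ih (n + 1) (c.set n v) (by omega) (by simp [hc]) (by omega)]
    have hgi : (c.set n v).getD i 0 = c.getD i 0 := by
      simp [List.getD_eq_getElem?_getD, List.getElem?_set_ne (by omega : n ≠ i)]
    have hset : c.set n v = c.take n ++ v :: c.drop (n + 1) :=
      List.set_eq_take_cons_drop v hnc
    have hlt : (c.take n).length = n := by simp; omega
    have htake : (c.set n v).take (n + 1) = c.take n ++ [v] := by
      rw [hset, List.take_append]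
      simp [hlt, List.take_of_length_le]
    have hdrop : (c.set n v).drop (n + 1) = c.drop (n + 1) := by
      rw [hset, List.drop_append]
      simp [hlt]
    have hdn : c.drop n = c.getD n 0 :: c.drop (n + 1) := by
      rw [List.drop_eq_getElem_cons hnc, List.getD_eq_getElem c 0 hnc]
    rw [hgi, htake, hdrop, hdn]
    simp [hv]

def pvSimpleStep (st : Int × Int) (x : Int) : Int × Int :=
  if x - st.1 ≠ 0 then (x, st.2 + 1) else st

theorem pvOuter_fold (a : List Int) :
    ∀ (d k : Nat) (c : List Int) (last ans : Int), a.length - k = d →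
    c.length = a.length → c.drop k = (a.drop k).map (fun v => v - last) →
    ((PySem.List.pyRange (k : Int) (a.length : Int) 1).foldl pvStepA (c, ans)).2
    = ((a.drop k).foldl pvSimpleStep (last, ans)).2 := by
  intro d
  induction d with
  | zero =>
    intro k c last ans hd hlen hdrop
    rw [PySem.List.pyRange_one_eq_nil (by exact_mod_cast (by omega : a.length ≤ k)),
        List.drop_eq_nil_of_le (by omega : a.length ≤ k)]
    rfl
  | succ d ih =>
    intro k c last ans hd hlen hdrop
    have hk : k < a.length := by omega
    have hkc : k < c.length := by omega
    have hck : c.getD k 0 = a.getD k 0 - last := by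
      have h1 := congrArg List.head? hdrop
      rw [List.head?_drop] at h1
      simp only [List.head?_map, List.head?_drop] at h1
      rw [List.getD_eq_getElem c 0 hkc, List.getD_eq_getElem a 0 hk]
      rw [List.getElem?_eq_getElem hkc, List.getElem?_eq_getElem hk] at h1
      simpa using h1
    have hdropc : c.drop (k + 1) = (a.drop (k + 1)).map (fun v => v - last) := by
      have h2 := congrArg List.tail hdrop
      rw [List.tail_drop] at h2
      rw [h2, ← List.map_tail, List.tail_drop]
    have hdcons : a.drop k = a.getD k 0 :: a.drop (k + 1) := by
      rw [List.drop_eq_getElem_cons hk, List.getD_eq_getElem a 0 hk]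
    rw [PySem.List.pyRange_one_cons (by exact_mod_cast hk), List.foldl_cons, hdcons,
        List.foldl_cons]
    by_cases hz : a.getD k 0 - last = 0
    · have hstep : pvStepA (c, ans) (k : Int) = (c, ans) := by
        unfold pvStepA
        simp only [PySem.List.pyGetD_natCast, hck]
        rw [hz]; simp
      have hsimple : pvSimpleStep (last, ans) (a.getD k 0) = (last, ans) := by
        unfold pvSimpleStep; rw [hz]; simp
      rw [hstep, hsimple]
      have hcast : ((k : Int) + 1) = ((k + 1 : Nat) : Int) := by push_cast; ring
      rw [hcast, ih (k + 1) c last ans (by omega) hlen hdropc]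
    · have hinner : pvInnerA (k : Int) c
          = c.take (k + 1) ++ (c.drop (k + 1)).map (fun v => v - c.getD k 0) := by
        unfold pvInnerA
        have hcast : ((k : Int) + 1) = ((k + 1 : Nat) : Int) := by push_cast; ring
        rw [hlen, hcast]
        exact pvInner_fold a.length k (a.length - (k + 1)) (k + 1) c rfl hlen (by omega)
      have hstep : pvStepA (c, ans) (k : Int) = (pvInnerA (k : Int) c, ans + 1) := by
        unfold pvStepA
        simp only [PySem.List.pyGetD_natCast, hck]
        rw [if_pos hz]
      have hsimple : pvSimpleStep (last, ans) (a.getD k 0) = (a.getD k 0, ans + 1) := by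
        unfold pvSimpleStep; rw [if_pos hz]
      rw [hstep, hsimple]
      have hcast : ((k : Int) + 1) = ((k + 1 : Nat) : Int) := by push_cast; ring
      set c' := pvInnerA (k : Int) c with hc'
      have hlen' : c'.length = a.length := by
        rw [hinner]
        simp
        try omega
      have hdrop' : c'.drop (k + 1) = (a.drop (k + 1)).map (fun v => v - a.getD k 0) := by
        rw [hinner, List.drop_append, List.drop_of_length_le (by simp; try omega),
            List.nil_append]
        have hlt : (List.take (k + 1) c).length = k + 1 := by simp; omega
        rw [hlt, Nat.sub_self, List.drop_zero, hdropc, List.map_map]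
        apply List.map_congr_left
        intro x hx
        rw [Function.comp_apply, hck]
        ring
      rw [hcast, ih (k + 1) c' (a.getD k 0) (ans + 1) (by omega) hlen' hdrop']

theorem pvSimple_count : ∀ (l : List Int), l.Pairwise (· < ·) → ∀ (last ans : Int),
    (∀ x ∈ l, last < x) → (l.foldl pvSimpleStep (last, ans)).2 = ans + l.length := by
  intro l
  induction l with
  | nil => intro _ last ans _; simp
  | cons x t ih =>
    intro hp last ans h
    have hx : last < x := h x (by simp)
    rw [List.foldl_cons, show pvSimpleStep (last, ans) x = (x, ans + 1) from by
      unfold pvSimpleStep; rw [if_pos (by omega)]]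
    rw [ih (List.Pairwise.of_cons hp) x (ans + 1) (fun y hy => List.rel_of_pairwise_cons hp hy)]
    simp
    omega


theorem pvA_char (nums : List Int) :
    solution_1627_4 nums =
      match PySem.List.sorted (PySem.Set.ofList nums) (fun x => x) false with
      | [] => 0
      | x :: t => if x = 0 then (t.length : Int) else (t.length : Int) + 1 := by
  unfold solution_1627_4
  change ((PySem.List.pyRange 0
      ((PySem.List.sorted (PySem.Set.ofList nums) (fun x => x) false).length : Int) 1).foldl
      pvStepA (PySem.List.sorted (PySem.Set.ofList nums) (fun x => x) false, 0)).2 = _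
  have hp : (PySem.List.sorted (PySem.Set.ofList nums) (fun x => x) false).Pairwise (· < ·) :=
    PySem.List.sorted_ofList_pairwise_lt nums
  generalize (PySem.List.sorted (PySem.Set.ofList nums) (fun x => x) false) = a at hp ⊢
  have h0 : ((PySem.List.pyRange ((0 : Nat) : Int) (a.length : Int) 1).foldl pvStepA (a, 0)).2
      = ((a.drop 0).foldl pvSimpleStep (0, 0)).2 :=
    pvOuter_fold a a.length 0 a 0 0 (by omega) rfl (by simp)
  simp only [Nat.cast_zero] at h0
  rw [h0, List.drop_zero]
  cases a with
  | nil => simp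
  | cons x t =>
    rw [List.foldl_cons]
    by_cases hx : x = 0
    · rw [show pvSimpleStep (0, 0) x = (0, 0) from by unfold pvSimpleStep; rw [hx]; simp]
      rw [pvSimple_count t (List.Pairwise.of_cons hp) 0 0
        (fun y hy => by have := List.rel_of_pairwise_cons hp hy; omega)]
      simp [hx]
    · rw [show pvSimpleStep (0, 0) x = (x, 1) from by
        unfold pvSimpleStep; rw [if_pos (by omega)]; norm_num]
      rw [pvSimple_count t (List.Pairwise.of_cons hp) x 1
        (fun y hy => List.rel_of_pairwise_cons hp hy)]
      simp only [if_neg hx]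
      ring


theorem pvB_char (nums : List Int) :
    solution_1627_4_alt nums =
      ((PySem.Set.ofList nums).length : Int) - (if (0 : Int) ∈ nums then 1 else 0) := by
  unfold solution_1627_4_alt
  have hnd : (PySem.Set.ofList nums).Nodup := PySem.Set.nodup_ofList nums
  have hperm : (PySem.Set.ofList (nums.filter (fun x => x != 0))).Perm
      ((PySem.Set.ofList nums).filter (fun x => x != 0)) := by
    rw [List.perm_ext_iff_of_nodup (PySem.Set.nodup_ofList _) (List.Nodup.filter _ hnd)]
    intro y
    simp [PySem.Set.mem_ofList, List.mem_filter]
  rw [hperm.length_eq]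
  by_cases h0 : (0 : Int) ∈ nums
  · have h0s : (0 : Int) ∈ PySem.Set.ofList nums := (PySem.Set.mem_ofList _ _).mpr h0
    have hc : (PySem.Set.ofList nums).count 0 = 1 :=
      List.count_eq_one_of_mem hnd h0s
    have hc' : ((PySem.Set.ofList nums).filter (fun x => x == 0)).length = 1 := by
      rw [← hc, List.count_eq_countP, List.countP_eq_length_filter]
    have hsplit : ((PySem.Set.ofList nums).filter (fun x => x != 0)).length
        + ((PySem.Set.ofList nums).filter (fun x => x == 0)).length
        = (PySem.Set.ofList nums).length := by
      rw [← List.countP_eq_length_filter, ← List.countP_eq_length_filter,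
          List.length_eq_countP_add_countP (fun (x : Int) => x != 0)
            (l := PySem.Set.ofList nums)]
      congr 1
      apply List.countP_congr
      intro x _
      simp [bne]
    rw [if_pos h0]
    omega
  · rw [List.filter_eq_self.mpr (fun y hy => by
      simp only [bne_iff_ne, ne_eq]
      intro hy0
      exact h0 (by rw [← hy0]; exact (PySem.Set.mem_ofList _ _).mp hy))]
    simp [h0]

-- A's sorted distinct head is the minimum of nums; together the two characterisations decide each case
theorem pv_main (nums : List Int) (hnD : ¬ D_solution_1627_4 nums) :
    solution_1627_4 nums = solution_1627_4_alt nums := by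
  rw [pvA_char, pvB_char]
  have hnD' : (0 : Int) ∈ nums → ∀ y ∈ nums, 0 ≤ y := by
    intro h0 y hy
    by_contra hneg
    exact hnD ⟨h0, y, hy, by omega⟩
  have hlen : (PySem.List.sorted (PySem.Set.ofList nums) (fun x => x) false).length
      = (PySem.Set.ofList nums).length := PySem.List.length_sorted _ _ _
  cases ha : PySem.List.sorted (PySem.Set.ofList nums) (fun x => x) false with
  | nil =>
    have hs : PySem.Set.ofList nums = [] := by
      have := hlen
      rw [ha] at this
      exact List.length_eq_zero_iff.mp this.symm
    have h0 : ¬ ((0 : Int) ∈ nums) := fun h => by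
      have := (PySem.Set.mem_ofList nums 0).mpr h
      simp [hs] at this
    simp [hs, h0]
  | cons x t =>
    rw [ha] at hlen
    simp only [List.length_cons] at hlen
    have hmemx : x ∈ nums := by
      have hx : x ∈ PySem.List.sorted (PySem.Set.ofList nums) (fun x => x) false := by
        rw [ha]; simp
      exact (PySem.Set.mem_ofList nums x).mp ((PySem.List.mem_sorted _ _ _ _).mp hx)
    by_cases h0 : (0 : Int) ∈ nums
    · have hpos : ∀ y ∈ nums, 0 ≤ y := by
        intro y hy
        exact hnD' h0 y hy
      have hle : x ≤ 0 :=
        PySem.List.key_head_sorted_le _ _ ha 0 ((PySem.Set.mem_ofList nums 0).mpr h0)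
      have hx0 : x = 0 := le_antisymm hle (hpos x hmemx)
      simp only [if_pos hx0, if_pos h0]
      have hlen' : ((PySem.Set.ofList nums).length : Int) = (t.length : Int) + 1 := by
        exact_mod_cast hlen.symm
      rw [hlen']
      ring
    · have hx0 : ¬ x = 0 := fun h => h0 (h ▸ hmemx)
      simp only [if_neg hx0, if_neg h0]
      have hlen' : ((PySem.Set.ofList nums).length : Int) = (t.length : Int) + 1 := by
        exact_mod_cast hlen.symm
      rw [hlen']
      ring

-- ===== VERDICT (by name: the statement is the Claim_ definition above) =====
theorem solution_1627_4_spec : Claim_unchanged_solution_1627_4 := by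
  unfold Claim_unchanged_solution_1627_4
  intro nums _
  unfold Spec_solution_1627_4
  intro hnD
  exact pv_main nums hnD

theorem solution_1627_4_changed : Claim_changed_solution_1627_4 := by
  unfold Claim_changed_solution_1627_4; decide

theorem solution_1627_4_tight : Claim_exact_solution_1627_4 := by
  unfold Claim_exact_solution_1627_4
  intro nums _ hD
  obtain ⟨h0, y, hy, hyneg⟩ := hD
  rw [pvA_char, pvB_char]
  have hlen : (PySem.List.sorted (PySem.Set.ofList nums) (fun x => x) false).length
      = (PySem.Set.ofList nums).length := PySem.List.length_sorted _ _ _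
  cases ha : PySem.List.sorted (PySem.Set.ofList nums) (fun x => x) false with
  | nil =>
    have hs : PySem.Set.ofList nums = [] := by
      have := hlen
      rw [ha] at this
      exact List.length_eq_zero_iff.mp this.symm
    have := (PySem.Set.mem_ofList nums 0).mpr h0
    simp [hs] at this
  | cons x t =>
    rw [ha] at hlen
    simp only [List.length_cons] at hlen
    have hle : x ≤ y :=
      PySem.List.key_head_sorted_le _ _ ha y ((PySem.Set.mem_ofList nums y).mpr hy)
    have hx0 : ¬ x = 0 := by omega
    have hred : (match x :: t with
        | [] => (0 : Int)
        | x :: t => if x = 0 then (t.length : Int) else (t.length : Int) + 1)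
        = (t.length : Int) + 1 := by
      simp only [if_neg hx0]
    rw [hred, if_pos h0]
    have hlen' : ((PySem.Set.ofList nums).length : Int) = (t.length : Int) + 1 := by
      exact_mod_cast hlen.symm
    rw [hlen']
    omega
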